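-- pv_equiv track=rewrite | github.com/ramabhadrarao/route_analytics_pro | utils/fleet_intelligence.py | _suggest_driver_training
-- ===== SOURCE A (Python) =====
-- from typing import Dict, List, Optional
--
-- def _suggest_driver_training(risk_factors: List) -> List[str]:
--     """Suggest driver training based on identified risks"""
--
--     training_suggestions = []
--
--     # Risk-based training suggestions
--     if any("speed" in factor.lower() for factor in risk_factors):
--         training_suggestions.append("Speed management and defensive driving course")
--
--     if any("turn" in factor.lower() for factor in risk_factors):
--         training_suggestions.append("Advanced vehicle handling and cornering techniques")
--
--     if any("efficiency" in factor.lower() for factor in risk_factors):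
--         training_suggestions.append("Route planning and fuel-efficient driving techniques")
--
--     # General training recommendations
--     training_suggestions.extend([
--         "Regular safety refresher training",
--         "First aid and emergency response training",
--         "Vehicle maintenance awareness training"
--     ])
--
--     return training_suggestions
-- ===== SOURCE B (Python) =====
-- def _suggest_driver_training(risk_factors):
--     """Suggest driver training based on identified risks.
--
--     Builds one comma-joined lowercase haystack and runs each keyword search
--     once on it, driven by a keyword->course table; ',' never occurs in a
--     keyword, so a match cannot span two factors."""
--     haystack = ",".join(factor.lower() for factor in risk_factors)
--     keyword_courses = [
--         ("speed", "Speed management and defensive driving course"),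
--         ("turn", "Advanced vehicle handling and cornering techniques"),
--         ("efficiency", "Route planning and fuel-efficient driving techniques"),
--     ]
--     return [course for keyword, course in keyword_courses if keyword in haystack] + [
--         "Regular safety refresher training",
--         "First aid and emergency response training",
--         "Vehicle maintenance awareness training",
--     ]
-- ===== Notes on version B (the rewrite author's own statement) =====
-- stated objective: alternative
-- what changed: Instead of A's three separate any(...) generator scans over the factor list, B joins all lowercased factors into one comma-separated haystack string and runs each keyword search once on it with C-level str search, driven by a keyword->course table; ',' never occurs in a keyword, so a match cannot span two factors.
import Mathlib
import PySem

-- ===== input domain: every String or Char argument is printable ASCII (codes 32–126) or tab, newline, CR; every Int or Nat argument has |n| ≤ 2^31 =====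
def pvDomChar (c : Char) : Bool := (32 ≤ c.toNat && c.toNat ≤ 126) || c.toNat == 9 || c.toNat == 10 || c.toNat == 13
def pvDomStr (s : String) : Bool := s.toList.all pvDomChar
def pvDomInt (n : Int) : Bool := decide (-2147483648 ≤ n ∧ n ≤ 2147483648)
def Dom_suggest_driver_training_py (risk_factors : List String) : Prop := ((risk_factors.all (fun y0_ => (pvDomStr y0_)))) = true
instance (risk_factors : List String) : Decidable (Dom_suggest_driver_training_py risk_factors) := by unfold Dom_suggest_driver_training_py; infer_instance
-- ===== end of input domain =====

-- B builds one comma-joined lowercase haystack and table-drives one search per keyword; equivalence proved below.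
-- ===== PORT A =====
def suggest_driver_training_py (risk_factors : List String) : List String :=
  let training_suggestions : List String := []
  let training_suggestions :=
    if risk_factors.any (fun factor => PySem.Str.isIn "speed" (PySem.Str.lower factor)) then
      training_suggestions ++ ["Speed management and defensive driving course"]
    else training_suggestions
  let training_suggestions :=
    if risk_factors.any (fun factor => PySem.Str.isIn "turn" (PySem.Str.lower factor)) then
      training_suggestions ++ ["Advanced vehicle handling and cornering techniques"]
    else training_suggestions
  let training_suggestions :=
    if risk_factors.any (fun factor => PySem.Str.isIn "efficiency" (PySem.Str.lower factor)) then
      training_suggestions ++ ["Route planning and fuel-efficient driving techniques"]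
    else training_suggestions
  training_suggestions ++
    ["Regular safety refresher training",
     "First aid and emergency response training",
     "Vehicle maintenance awareness training"]

-- ===== PORT B =====
def suggest_driver_training_py_alt (risk_factors : List String) : List String :=
  let haystack := PySem.Str.join "," (risk_factors.map (fun factor => PySem.Str.lower factor))
  let keyword_courses : List (String × String) :=
    [("speed", "Speed management and defensive driving course"),
     ("turn", "Advanced vehicle handling and cornering techniques"),
     ("efficiency", "Route planning and fuel-efficient driving techniques")]
  (keyword_courses.filterMap
    (fun kc => if PySem.Str.isIn kc.1 haystack then some kc.2 else none)) ++
  ["Regular safety refresher training",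
   "First aid and emergency response training",
   "Vehicle maintenance awareness training"]

-- ===== PRECONDITION & SPEC =====
def Spec_suggest_driver_training_py (risk_factors : List String) (out : List String) : Prop := out = suggest_driver_training_py_alt risk_factors
instance (risk_factors : List String) (out : List String) : Decidable (Spec_suggest_driver_training_py risk_factors out) := by unfold Spec_suggest_driver_training_py; infer_instance

-- ===== CLAIM (what is proved, stated in full; the proofs are below) =====
def Claim_equal_suggest_driver_training_py : Prop := ∀ (risk_factors : List String), Dom_suggest_driver_training_py risk_factors → Spec_suggest_driver_training_py risk_factors (suggest_driver_training_py risk_factors)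

-- ===== LEMMAS AND PROOFS =====

-- A prefix of a ++ sep :: b that avoids sep is a prefix of a.
theorem prefix_of_append_sep {p a b : List Char} {sep : Char}
    (h : p <+: a ++ sep :: b) (hsep : sep ∉ p) : p <+: a := by
  induction a generalizing p with
  | nil =>
    cases p with
    | nil => exact List.nil_prefix
    | cons q p' =>
      rcases (List.cons_prefix_cons).1 h with ⟨rfl, _⟩
      exact absurd (List.mem_cons_self) hsep
  | cons c a' ih =>
    cases p with
    | nil => exact List.nil_prefix
    | cons q p' =>
      rcases (List.cons_prefix_cons).1 h with ⟨rfl, h'⟩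
      exact (List.cons_prefix_cons).2 ⟨rfl, ih h' (fun hm => hsep (List.mem_cons_of_mem _ hm))⟩

-- A nonempty infix of a ++ sep :: b that avoids sep lies in a or in b.
theorem infix_of_append_sep {p a b : List Char} {sep : Char}
    (h : p <:+: a ++ sep :: b) (hne : p ≠ []) (hsep : sep ∉ p) :
    p <:+: a ∨ p <:+: b := by
  induction a with
  | nil =>
    rcases (List.infix_cons_iff).1 h with hpre | hinf
    · cases p with
      | nil => exact absurd rfl hne
      | cons q p' =>
        rcases (List.cons_prefix_cons).1 hpre with ⟨rfl, _⟩
        exact absurd (List.mem_cons_self) hsep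
    · exact Or.inr hinf
  | cons c a' ih =>
    rcases (List.infix_cons_iff).1 h with hpre | hinf
    · exact Or.inl (prefix_of_append_sep hpre hsep).isInfix
    · rcases ih hinf with ha | hb
      · exact Or.inl (ha.trans ⟨[c], [], by simp⟩)
      · exact Or.inr hb

-- A keyword occurs in the sep-joined list iff it occurs in some element.
theorem isIn_join_iff (p : List Char) (sep : Char) (ls : List (List Char))
    (hne : p ≠ []) (hsep : sep ∉ p) :
    PySem.Chars.isIn p (PySem.Chars.join [sep] ls) = ls.any (fun l => PySem.Chars.isIn p l) := by
  induction ls with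
  | nil =>
    simp only [PySem.Chars.join_nil, List.any_nil]
    rw [PySem.Chars.isIn_eq_false_iff]
    intro hinf
    exact hne (List.eq_nil_of_infix_nil hinf)
  | cons x t ih =>
    cases t with
    | nil =>
      simp [PySem.Chars.join_singleton]
    | cons y t' =>
      rw [PySem.Chars.join_cons_cons]
      rcases hx : PySem.Chars.isIn p (x ++ [sep] ++ PySem.Chars.join [sep] (y :: t')) with _ | _
      · -- false: neither part contains p
        rw [PySem.Chars.isIn_eq_false_iff] at hx
        symm
        rw [List.any_cons, Bool.or_eq_false_iff]
        constructor
        · rw [PySem.Chars.isIn_eq_false_iff]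
          intro hinf
          exact hx (hinf.trans ⟨[], [sep] ++ PySem.Chars.join [sep] (y :: t'), by simp⟩)
        · rw [← ih, PySem.Chars.isIn_eq_false_iff]
          intro hinf
          exact hx (hinf.trans ⟨x ++ [sep], [], by simp⟩)
      · -- true: p is in x or in the tail join
        rw [PySem.Chars.isIn_iff_infix] at hx
        have h' : p <:+: x ++ sep :: PySem.Chars.join [sep] (y :: t') := by
          simpa [List.append_assoc] using hx
        symm
        rw [List.any_cons, ← ih]
        rcases infix_of_append_sep h' hne hsep with ha | hb
        · rw [(PySem.Chars.isIn_iff_infix _ _).2 ha, Bool.true_or]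
        · rw [(PySem.Chars.isIn_iff_infix _ _).2 hb, Bool.or_true]

-- String-level: keyword in the comma-joined lowered factors iff in some lowered factor.
theorem isIn_haystack (kw : String) (rf : List String)
    (hne : kw.toList ≠ []) (hsep : (',' : Char) ∉ kw.toList) :
    PySem.Str.isIn kw (PySem.Str.join "," (rf.map (fun f => PySem.Str.lower f)))
      = rf.any (fun f => PySem.Str.isIn kw (PySem.Str.lower f)) := by
  rw [show (PySem.Str.isIn kw (PySem.Str.join "," (rf.map (fun f => PySem.Str.lower f))))
      = PySem.Chars.isIn kw.toList ((PySem.Str.join "," (rf.map (fun f => PySem.Str.lower f))).toList)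
    from by simp [PySem.Str.isIn]]
  rw [PySem.Str.toList_join]
  have : (",".toList : List Char) = [','] := rfl
  rw [this, List.map_map, isIn_join_iff _ _ _ hne hsep, List.any_map]
  simp [PySem.Str.isIn, Function.comp_def]

-- ===== VERDICT (by name: the statement is the Claim_ definition above) =====
theorem suggest_driver_training_py_spec : Claim_equal_suggest_driver_training_py := by
  intro rf _
  unfold Spec_suggest_driver_training_py suggest_driver_training_py suggest_driver_training_py_alt
  simp only [List.filterMap_cons, List.filterMap_nil]
  rw [isIn_haystack "speed" rf (by decide) (by decide),
      isIn_haystack "turn" rf (by decide) (by decide),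
      isIn_haystack "efficiency" rf (by decide) (by decide)]
  by_cases h1 : rf.any (fun factor => PySem.Str.isIn "speed" (PySem.Str.lower factor)) <;>
  by_cases h2 : rf.any (fun factor => PySem.Str.isIn "turn" (PySem.Str.lower factor)) <;>
  by_cases h3 : rf.any (fun factor => PySem.Str.isIn "efficiency" (PySem.Str.lower factor)) <;>
  simp only [h1, h2, h3] <;> simp
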